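-- pv_equiv track=rewrite | github.com/shaharharel/edit-rna-apobec | experiments/apobec3b/exp_clinvar_a3b.py | _stem_length
-- ===== SOURCE A (Python) =====
-- def _stem_length(dot_bracket, boundary_pos, direction):
--     n = len(dot_bracket)
--     if boundary_pos < 0 or boundary_pos >= n:
--         return 0
--     if dot_bracket[boundary_pos] not in "()":
--         return 0
--     count = 0
--     if direction == "left":
--         i = boundary_pos
--         while i >= 0 and dot_bracket[i] in "()":
--             count += 1
--             i -= 1
--     else:
--         i = boundary_pos
--         while i < n and dot_bracket[i] in "()":
--             count += 1
--             i += 1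
--     return count
-- ===== SOURCE B (Python) =====
-- def _stem_length(dot_bracket, boundary_pos, direction):
--     n = len(dot_bracket)
--     if boundary_pos < 0 or boundary_pos >= n:
--         return 0
--     if dot_bracket[boundary_pos] not in "()":
--         return 0
--     if direction == "left":
--         s = dot_bracket[:boundary_pos + 1]
--         return len(s) - len(s.rstrip("()"))
--     s = dot_bracket[boundary_pos:]
--     return len(s) - len(s.lstrip("()"))
-- ===== Notes on version B (the rewrite author's own statement) =====
-- stated objective: idiomatic
-- what changed: Replaces the manual index while-loop with slicing plus lstrip/rstrip('()'): the contiguous bracket run is measured as the length lost by stripping brackets from the relevant end of the slice.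
import Mathlib
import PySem

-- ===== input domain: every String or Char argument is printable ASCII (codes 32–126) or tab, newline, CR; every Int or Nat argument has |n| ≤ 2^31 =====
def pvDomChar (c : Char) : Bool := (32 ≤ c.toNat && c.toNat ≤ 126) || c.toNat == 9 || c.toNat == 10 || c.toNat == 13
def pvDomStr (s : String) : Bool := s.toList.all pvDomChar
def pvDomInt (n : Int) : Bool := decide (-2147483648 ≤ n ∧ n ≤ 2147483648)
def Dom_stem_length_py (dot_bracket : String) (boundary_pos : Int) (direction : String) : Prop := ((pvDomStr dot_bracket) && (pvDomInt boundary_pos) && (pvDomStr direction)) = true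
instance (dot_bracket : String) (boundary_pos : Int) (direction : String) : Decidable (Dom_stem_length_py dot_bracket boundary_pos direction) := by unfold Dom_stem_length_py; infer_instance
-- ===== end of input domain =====

-- B replaces A's manual index while-loop by slicing and stripping '()' from the relevant end (idiomatic; same cost).

-- ===== PORT A =====
-- `c in "()"` for a single char
def pvIsBr (c : Char) : Bool := c == '(' || c == ')'
-- `dot_bracket[i] in "()"` where the index may be probed by the loop; none (out of range) cannot occur under the guards
def pvIsBrO (o : Option Char) : Bool := o.elim false pvIsBr

-- while i >= 0 and dot_bracket[i] in "()": count += 1; i -= 1   (fuel = boundary_pos+1 suffices: i only decreases)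
def pvLoopLeft (cs : List Char) : Nat → Int → Int → Int
  | 0, _, count => count
  | f + 1, i, count =>
    if 0 ≤ i ∧ pvIsBrO (PySem.List.pyGet? cs i) then pvLoopLeft cs f (i - 1) (count + 1)
    else count

-- while i < n and dot_bracket[i] in "()": count += 1; i += 1   (fuel = n-boundary_pos suffices: i only increases)
def pvLoopRight (cs : List Char) (n : Int) : Nat → Int → Int → Int
  | 0, _, count => count
  | f + 1, i, count =>
    if i < n ∧ pvIsBrO (PySem.List.pyGet? cs i) then pvLoopRight cs n f (i + 1) (count + 1)
    else count

def stem_length_py (dot_bracket : String) (boundary_pos : Int) (direction : String) : Int :=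
  let cs := dot_bracket.toList
  let n : Int := cs.length
  if boundary_pos < 0 ∨ boundary_pos ≥ n then 0
  else if pvIsBrO (PySem.List.pyGet? cs boundary_pos) = false then 0
  else if direction == "left" then pvLoopLeft cs (boundary_pos.toNat + 1) boundary_pos 0
  else pvLoopRight cs n (n - boundary_pos).toNat boundary_pos 0

-- ===== PORT B =====
-- s.lstrip("()") / s.rstrip("()") ported by hand (exact: drop chars of "()" from the given end)
def pvLstripBr (s : List Char) : List Char := s.dropWhile pvIsBr
def pvRstripBr (s : List Char) : List Char := (s.reverse.dropWhile pvIsBr).reverse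

def stem_length_py_alt (dot_bracket : String) (boundary_pos : Int) (direction : String) : Int :=
  let cs := dot_bracket.toList
  let n : Int := cs.length
  if boundary_pos < 0 ∨ boundary_pos ≥ n then 0
  else if pvIsBrO (PySem.List.pyGet? cs boundary_pos) = false then 0
  else if direction == "left" then
    let s := PySem.List.slice cs none (some (boundary_pos + 1))
    (s.length : Int) - ((pvRstripBr s).length : Int)
  else
    let s := PySem.List.slice cs (some boundary_pos) none
    (s.length : Int) - ((pvLstripBr s).length : Int)

-- ===== PRECONDITION & SPEC =====
def Spec_stem_length_py (dot_bracket : String) (boundary_pos : Int) (direction : String) (out : Int) : Prop := out = stem_length_py_alt dot_bracket boundary_pos direction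
instance (dot_bracket : String) (boundary_pos : Int) (direction : String) (out : Int) : Decidable (Spec_stem_length_py dot_bracket boundary_pos direction out) := by unfold Spec_stem_length_py; infer_instance

-- ===== CLAIM (what is proved, stated in full; the proofs are below) =====
def Claim_equal_stem_length_py : Prop := ∀ (dot_bracket : String) (boundary_pos : Int) (direction : String), Dom_stem_length_py dot_bracket boundary_pos direction → Spec_stem_length_py dot_bracket boundary_pos direction (stem_length_py dot_bracket boundary_pos direction)

-- ===== LEMMAS AND PROOFS =====

lemma pvTakeDrop (p : Char → Bool) (l : List Char) :
    (l.takeWhile p).length + (l.dropWhile p).length = l.length := by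
  rw [← List.length_append, List.takeWhile_append_dropWhile]

lemma pvLoopRight_eq (cs : List Char) : ∀ (f k : Nat) (c : Int), k + f = cs.length →
    pvLoopRight cs (cs.length : Int) f (k : Int) c
      = c + (((cs.drop k).takeWhile pvIsBr).length : Int) := by
  intro f
  induction f with
  | zero =>
    intro k c hk
    have : k = cs.length := by omega
    subst this
    simp [pvLoopRight]
  | succ f ih =>
    intro k c hk
    have hk' : k < cs.length := by omega
    have hget : PySem.List.pyGet? cs (k : Int) = some cs[k] := by
      simp [PySem.List.pyGet?_natCast, List.getElem?_eq_getElem hk']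
    have hdrop : cs.drop k = cs[k] :: cs.drop (k + 1) :=
      List.drop_eq_getElem_cons hk'
    by_cases hbr : pvIsBr cs[k]
    · have hstep : pvLoopRight cs (cs.length : Int) (f + 1) (k : Int) c
          = pvLoopRight cs (cs.length : Int) f ((k : Int) + 1) (c + 1) := by
        simp [pvLoopRight, pvIsBrO, hbr, hk']
      rw [hstep]
      have hcast : ((k : Int) + 1) = ((k + 1 : Nat) : Int) := by push_cast; ring
      rw [hcast, ih (k + 1) (c + 1) (by omega)]
      rw [hdrop, List.takeWhile_cons_of_pos hbr]
      simp
      omega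
    · have hstep : pvLoopRight cs (cs.length : Int) (f + 1) (k : Int) c = c := by
        simp [pvLoopRight, hget, pvIsBrO, hbr]
      rw [hstep, hdrop, List.takeWhile_cons_of_neg (by simpa using hbr)]
      simp

lemma pvLoopLeft_eq (cs : List Char) : ∀ (f : Nat) (c : Int), f ≤ cs.length →
    pvLoopLeft cs f ((f : Int) - 1) c
      = c + ((((cs.take f).reverse).takeWhile pvIsBr).length : Int) := by
  intro f
  induction f with
  | zero =>
    intro c _
    simp [pvLoopLeft]
  | succ f ih =>
    intro c hf
    have hf' : f < cs.length := by omega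
    have hi : ((f + 1 : Nat) : Int) - 1 = (f : Int) := by push_cast; ring
    have hget : PySem.List.pyGet? cs (f : Int) = some cs[f] := by
      simp [PySem.List.pyGet?_natCast, List.getElem?_eq_getElem hf']
    have htake : (cs.take (f + 1)).reverse = cs[f] :: (cs.take f).reverse := by
      rw [List.take_add_one, List.getElem?_eq_getElem hf']
      simp
    by_cases hbr : pvIsBr cs[f]
    · have hstep : pvLoopLeft cs (f + 1) (((f + 1 : Nat) : Int) - 1) c
          = pvLoopLeft cs f ((f : Int) - 1) (c + 1) := by
        rw [hi]
        simp [pvLoopLeft, hget, pvIsBrO, hbr]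
      rw [hstep, ih (c + 1) (by omega), htake, List.takeWhile_cons_of_pos hbr]
      simp
      omega
    · have hstep : pvLoopLeft cs (f + 1) (((f + 1 : Nat) : Int) - 1) c = c := by
        rw [hi]
        simp [pvLoopLeft, hget, pvIsBrO, hbr]
      rw [hstep, htake, List.takeWhile_cons_of_neg (by simpa using hbr)]
      simp

-- ===== VERDICT (by name: the statement is the Claim_ definition above) =====
theorem stem_length_py_spec : Claim_equal_stem_length_py := by
  intro dot_bracket boundary_pos direction _
  unfold Spec_stem_length_py stem_length_py stem_length_py_alt
  set cs := dot_bracket.toList with hcs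
  by_cases hrange : boundary_pos < 0 ∨ boundary_pos ≥ (cs.length : Int)
  · simp [hrange]
  · simp only [if_neg hrange]
    push Not at hrange
    obtain ⟨h0, hn⟩ := hrange
    by_cases hbr : pvIsBrO (PySem.List.pyGet? cs boundary_pos) = false
    · simp [hbr]
    · simp only [if_neg hbr]
      have hbpnat : ((boundary_pos.toNat : Nat) : Int) = boundary_pos := Int.toNat_of_nonneg h0
      by_cases hdir : direction == "left"
      · simp only [if_pos hdir]
        -- left side
        have hA : pvLoopLeft cs (boundary_pos.toNat + 1) boundary_pos 0
            = 0 + ((((cs.take (boundary_pos.toNat + 1)).reverse).takeWhile pvIsBr).length : Int) := by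
          have := pvLoopLeft_eq cs (boundary_pos.toNat + 1) 0 (by omega)
          rw [show (((boundary_pos.toNat + 1 : Nat)) : Int) - 1 = boundary_pos by omega] at this
          exact this
        rw [hA]
        have hslice : PySem.List.slice cs none (some (boundary_pos + 1)) = cs.take (boundary_pos.toNat + 1) := by
          rw [PySem.List.slice_to cs (by omega)]
          congr 1
          omega
        rw [hslice]
        set s := cs.take (boundary_pos.toNat + 1) with hs
        have hlen : (s.reverse.takeWhile pvIsBr).length + (s.reverse.dropWhile pvIsBr).length = s.length := by
          have := pvTakeDrop pvIsBr s.reverse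
          simpa using this
        unfold pvRstripBr
        simp only [List.length_reverse]
        omega
      · simp only [if_neg hdir]
        -- right side
        have hA : pvLoopRight cs (cs.length : Int) ((cs.length : Int) - boundary_pos).toNat boundary_pos 0
            = 0 + (((cs.drop boundary_pos.toNat).takeWhile pvIsBr).length : Int) := by
          have := pvLoopRight_eq cs ((cs.length : Int) - boundary_pos).toNat boundary_pos.toNat 0 (by omega)
          rw [hbpnat] at this
          exact this
        rw [hA]
        have hslice : PySem.List.slice cs (some boundary_pos) none = cs.drop boundary_pos.toNat :=
          PySem.List.slice_from cs h0
        rw [hslice]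
        set s := cs.drop boundary_pos.toNat with hs
        have hlen : (s.takeWhile pvIsBr).length + (s.dropWhile pvIsBr).length = s.length :=
          pvTakeDrop pvIsBr s
        unfold pvLstripBr
        omega
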